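-- pv_equiv track=rewrite | github.com/pypi-data/pypi-mirror-77 | packages/datesy/datesy-0.9.0.tar.gz/datesy-0.9.0/datesy/matching.py | _find_direct_matches
-- ===== SOURCE A (Python) =====
-- def _find_direct_matches(list_for_matching, list_to_be_matched_to):
--     """
--     Find all 100% matches between the values of the two iterables
--
--     Parameters
--     ----------
--     list_for_matching : list, set
--         iterable containing the keys
--     list_to_be_matched_to : list, set
--         iterable containing the values to match to the keys
--
--     Returns
--     -------
--
--     matched : dict
--         all 100% matches
--
--     """
--     matches = dict()
--
--     for entry_a in list_for_matching.copy():
--         if entry_a in list_to_be_matched_to: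
--             matches[entry_a] = entry_a
--             list_for_matching.remove(entry_a)
--             list_to_be_matched_to.remove(entry_a)
--
--     return matches
-- ===== SOURCE B (Python) =====
-- # B: one pass via frequency-free set/dedup tables instead of A's repeated membership
-- # tests and in-place removals; B does NOT mutate its arguments (return-value equivalence).
-- def _find_direct_matches(list_for_matching, list_to_be_matched_to):
--     matchable = set(list_to_be_matched_to)
--     return {v: v for v in dict.fromkeys(list_for_matching) if v in matchable}
-- ===== Notes on version B (the rewrite author's own statement) =====
-- stated objective: faster
-- what changed: A repeatedly tests membership in and removes from the live target list while scanning a copy of the key list; B builds a hash set of the targets once and an ordered dedup of the keys (dict.fromkeys), emitting v->v for each distinct key found in the set, with no removals (B does not mutate its arguments; return values agree).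
import Mathlib
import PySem

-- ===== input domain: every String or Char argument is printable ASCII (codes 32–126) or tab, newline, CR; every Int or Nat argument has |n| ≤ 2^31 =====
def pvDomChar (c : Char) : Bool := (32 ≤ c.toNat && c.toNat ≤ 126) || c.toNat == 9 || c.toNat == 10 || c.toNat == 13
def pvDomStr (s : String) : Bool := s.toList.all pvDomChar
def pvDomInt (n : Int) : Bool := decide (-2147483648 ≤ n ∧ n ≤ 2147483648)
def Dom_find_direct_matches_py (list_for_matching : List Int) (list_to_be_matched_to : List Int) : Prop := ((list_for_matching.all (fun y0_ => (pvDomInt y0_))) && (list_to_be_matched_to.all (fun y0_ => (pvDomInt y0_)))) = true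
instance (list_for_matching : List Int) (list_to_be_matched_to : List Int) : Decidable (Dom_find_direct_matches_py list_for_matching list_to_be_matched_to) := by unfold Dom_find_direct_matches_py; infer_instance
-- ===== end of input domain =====

-- B replaces A's scan-with-in-place-removals by a set of the targets plus an ordered dedup of
-- the keys (simpler, one membership structure); A mutates both arguments, B does not: the
-- equivalence proved here is about the RETURN value only.


-- ===== PORT A =====
-- the loop 'for entry_a in list_for_matching.copy(): …' — state = (list_for_matching,
-- list_to_be_matched_to, matches); '.remove' never raises here, so '.getD' only makes it total
def pvGoA : List Int → List Int → List Int → PySem.Dict Int Int → PySem.Dict Int Int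
  | [], _, _, ms => ms
  | entry_a :: rest, fa, fb, ms =>
    if entry_a ∈ fb then
      pvGoA rest ((PySem.List.remove? fa entry_a).getD fa)
                 ((PySem.List.remove? fb entry_a).getD fb)
                 (ms.insert entry_a entry_a)
    else
      pvGoA rest fa fb ms

def find_direct_matches_py (list_for_matching : List Int) (list_to_be_matched_to : List Int) : List (Int × Int) :=
  (pvGoA list_for_matching list_for_matching list_to_be_matched_to PySem.Dict.empty).items

-- ===== PORT B =====
def find_direct_matches_py_alt (list_for_matching : List Int) (list_to_be_matched_to : List Int) : List (Int × Int) :=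
  let matchable : PySem.Set Int := PySem.Set.ofList list_to_be_matched_to
  ((PySem.List.dedup list_for_matching).foldl
      (fun ms v => if PySem.Set.contains matchable v then ms.insert v v else ms)
      PySem.Dict.empty).items

-- ===== PRECONDITION & SPEC =====
def Spec_find_direct_matches_py (list_for_matching : List Int) (list_to_be_matched_to : List Int) (out : List (Int × Int)) : Prop := out = find_direct_matches_py_alt list_for_matching list_to_be_matched_to
instance (list_for_matching : List Int) (list_to_be_matched_to : List Int) (out : List (Int × Int)) : Decidable (Spec_find_direct_matches_py list_for_matching list_to_be_matched_to out) := by unfold Spec_find_direct_matches_py; infer_instance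

-- ===== CLAIM (what is proved, stated in full; the proofs are below) =====
def Claim_equal_find_direct_matches_py : Prop := ∀ (list_for_matching : List Int) (list_to_be_matched_to : List Int), Dom_find_direct_matches_py list_for_matching list_to_be_matched_to → Spec_find_direct_matches_py list_for_matching list_to_be_matched_to (find_direct_matches_py list_for_matching list_to_be_matched_to)

-- ===== LEMMAS AND PROOFS =====

-- the canonical step both sides reduce to: insert v ↦ v when v is in the ORIGINAL target list
def pvStep (b : List Int) (d : PySem.Dict Int Int) (v : Int) : PySem.Dict Int Int :=
  if v ∈ b then d.insert v v else d

-- invariant carried through both loops: distinct keys, every stored value equals its key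
def pvGood (d : PySem.Dict Int Int) : Prop :=
  d.keys.Nodup ∧ ∀ p ∈ d.items, p.2 = p.1

theorem pvGood_empty : pvGood (PySem.Dict.empty : PySem.Dict Int Int) := by
  refine ⟨PySem.Dict.nodup_keys_empty, ?_⟩
  intro p hp; simp [PySem.Dict.empty] at hp

theorem pvGood_insert (d : PySem.Dict Int Int) (v : Int) (h : pvGood d) :
    pvGood (d.insert v v) := by
  obtain ⟨h1, h2⟩ := h
  refine ⟨PySem.Dict.nodup_keys_insert d v v h1, ?_⟩
  intro p hp
  rcases (PySem.Dict.mem_items_insert d v v p).1 hp with h | ⟨hmem, _⟩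
  · subst h; rfl
  · exact h2 p hmem

theorem pvGood_step (b : List Int) (d : PySem.Dict Int Int) (v : Int) (h : pvGood d) :
    pvGood (pvStep b d v) := by
  unfold pvStep; split
  · exact pvGood_insert d v h
  · exact h

-- overwriting a key that already stores itself changes nothing
theorem pvInsert_noop (d : PySem.Dict Int Int) (v : Int) (h : pvGood d)
    (hv : d.get? v = some v) : d.insert v v = d := by
  apply PySem.Dict.ext
  have hc : d.contains v = true := by
    rw [PySem.Dict.contains_eq_isSome_get?, hv]; rfl
  rw [PySem.Dict.items_insert_of_contains d v hc]
  conv_rhs => rw [← List.map_id d.items]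
  apply List.map_congr_left
  intro p hp
  by_cases h1 : p.1 = v
  · have h2 : p.2 = p.1 := h.2 p hp
    simp [h1, h2, Prod.ext_iff]
  · simp [h1]

-- once v is settled (absent from b, or already stored as itself), every later occurrence
-- of v in the loop is a no-op: the fold equals the fold over the list with v filtered out
theorem pvFold_skip (b : List Int) (v : Int) :
    ∀ (l : List Int) (d : PySem.Dict Int Int), pvGood d →
      (v ∉ b ∨ d.get? v = some v) →
      l.foldl (pvStep b) d = (l.filter (fun w => decide (w ≠ v))).foldl (pvStep b) d := by
  intro l
  induction l with
  | nil => intro d _ _; rfl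
  | cons w rest ih =>
    intro d hd hv
    by_cases hwv : w = v
    · subst hwv
      have hstep : pvStep b d w = d := by
        unfold pvStep; rcases hv with h | h
        · simp [h]
        · split
          · exact pvInsert_noop d w hd h
          · rfl
      simp only [List.foldl_cons, List.filter_cons, hstep]
      rw [if_neg (by simp)]
      exact ih d hd hv
    · simp only [List.foldl_cons, List.filter_cons]
      rw [if_pos (by simp [hwv])]
      simp only [List.foldl_cons]
      refine ih (pvStep b d w) (pvGood_step b d w hd) ?_
      rcases hv with h | h
      · exact Or.inl h
      · refine Or.inr ?_
        unfold pvStep; split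
        · rw [PySem.Dict.get?_insert_of_ne d w (fun he => hwv he.symm)]; exact h
        · exact h

-- PySem.Set.add no-ops on elements already present, so the building fold may drop them
theorem pvAdd_skip (v : Int) :
    ∀ (l : List Int) (s : List Int), v ∈ s →
      l.foldl PySem.Set.add s = (l.filter (fun w => decide (w ≠ v))).foldl PySem.Set.add s := by
  intro l
  induction l with
  | nil => intro s _; rfl
  | cons w rest ih =>
    intro s hs
    by_cases hwv : w = v
    · subst hwv
      have hstep : PySem.Set.add s w = s := by
        simp [PySem.Set.add, PySem.Set.contains, hs]
      simp only [List.foldl_cons, List.filter_cons, hstep]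
      rw [if_neg (by simp)]
      exact ih s hs
    · simp only [List.foldl_cons, List.filter_cons]
      rw [if_pos (by simp [hwv])]
      simp only [List.foldl_cons]
      refine ih (PySem.Set.add s w) ?_
      simp only [PySem.Set.add, PySem.Set.contains]
      split
      · exact hs
      · exact List.mem_append_left _ hs

theorem pvAdd_cons (v : Int) :
    ∀ (l : List Int) (s : List Int), v ∉ l →
      l.foldl PySem.Set.add (v :: s) = v :: l.foldl PySem.Set.add s := by
  intro l
  induction l with
  | nil => intro s _; rfl
  | cons w rest ih =>
    intro s hv
    have hwv : w ≠ v := fun h => hv (by simp [h])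
    have hvr : v ∉ rest := fun h => hv (by simp [h])
    simp only [List.foldl_cons]
    by_cases hws : w ∈ s
    · have h1 : PySem.Set.add (v :: s) w = v :: s := by
        simp [PySem.Set.add, PySem.Set.contains, hws, hwv]
      have h2 : PySem.Set.add s w = s := by simp [PySem.Set.add, PySem.Set.contains, hws]
      rw [h1, h2, ih s hvr]
    · have h1 : PySem.Set.add (v :: s) w = v :: (s ++ [w]) := by
        simp [PySem.Set.add, PySem.Set.contains, hws, hwv]
      have h2 : PySem.Set.add s w = s ++ [w] := by
        simp [PySem.Set.add, PySem.Set.contains, hws]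
      rw [h1, h2, ih (s ++ [w]) hvr]

-- Python's dict.fromkeys dedup, unfolded one step
theorem pvDedup_cons (v : Int) (rest : List Int) :
    PySem.List.dedup (v :: rest)
      = v :: PySem.List.dedup (rest.filter (fun w => decide (w ≠ v))) := by
  have hnv : v ∉ rest.filter (fun w => decide (w ≠ v)) := by
    intro h; simpa using (List.of_mem_filter h)
  calc PySem.List.dedup (v :: rest)
      = (v :: rest).foldl PySem.Set.add [] := by
        rw [PySem.List.dedup_eq_ofList, PySem.Set.ofList_eq_foldl]
    _ = rest.foldl PySem.Set.add [v] := by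
        simp [PySem.Set.add, PySem.Set.contains]
    _ = (rest.filter (fun w => decide (w ≠ v))).foldl PySem.Set.add [v] :=
        pvAdd_skip v rest [v] (by simp)
    _ = v :: (rest.filter (fun w => decide (w ≠ v))).foldl PySem.Set.add [] :=
        pvAdd_cons v _ [] hnv
    _ = v :: PySem.List.dedup (rest.filter (fun w => decide (w ≠ v))) := by
        rw [PySem.List.dedup_eq_ofList, PySem.Set.ofList_eq_foldl]

-- duplicates are no-ops for pvStep: folding over l equals folding over dedup l
theorem pvFold_dedup (b : List Int) :
    ∀ (n : Nat) (l : List Int), l.length ≤ n → ∀ (d : PySem.Dict Int Int), pvGood d →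
      l.foldl (pvStep b) d = (PySem.List.dedup l).foldl (pvStep b) d := by
  intro n
  induction n with
  | zero =>
    intro l hl d _
    have : l = [] := List.eq_nil_of_length_eq_zero (Nat.le_zero.mp hl)
    subst this; rfl
  | succ n ih =>
    intro l hl d hd
    cases l with
    | nil => rfl
    | cons v rest =>
      rw [pvDedup_cons]
      simp only [List.foldl_cons]
      have hgood' : pvGood (pvStep b d v) := pvGood_step b d v hd
      have hsettle : v ∉ b ∨ (pvStep b d v).get? v = some v := by
        by_cases hvb : v ∈ b
        · right; unfold pvStep; rw [if_pos hvb]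
          exact PySem.Dict.get?_insert_self d v v
        · exact Or.inl hvb
      have hlen : (rest.filter (fun w => decide (w ≠ v))).length ≤ n :=
        le_trans (List.length_filter_le _ _) (Nat.succ_le_succ_iff.mp hl)
      rw [pvFold_skip b v rest (pvStep b d v) hgood' hsettle]
      exact ih _ hlen (pvStep b d v) hgood'

-- A's loop, with its shrinking target list, computes the static-membership fold
theorem pvGoA_eq_fold (b : List Int) :
    ∀ (l fa fb : List Int) (m : PySem.Dict Int Int), pvGood m →
      (∀ k, k ∈ fb → k ∈ b) →
      (∀ k, m.contains k = false → (k ∈ fb ↔ k ∈ b)) →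
      pvGoA l fa fb m = l.foldl (pvStep b) m := by
  intro l
  induction l with
  | nil => intro fa fb m _ _ _; simp [pvGoA]
  | cons v rest ih =>
    intro fa fb m hm hsub hmiss
    by_cases hv : v ∈ fb
    · have hvb : v ∈ b := hsub v hv
      have hstep : pvStep b m v = m.insert v v := by unfold pvStep; rw [if_pos hvb]
      have herase : (PySem.List.remove? fb v).getD fb = fb.erase v := by
        rw [PySem.List.remove?_eq_some_erase fb v hv]; rfl
      simp only [pvGoA, List.foldl_cons, hstep]
      rw [if_pos hv, herase]
      refine ih _ (fb.erase v) (m.insert v v) (pvGood_insert m v hm) ?_ ?_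
      · intro k hk; exact hsub k (List.mem_of_mem_erase hk)
      · intro k hk
        have hci := PySem.Dict.contains_insert m v k v
        rw [hk] at hci
        have hkv : k ≠ v := by
          intro h; subst h; simp at hci
        have hk' : m.contains k = false := by
          have hbeq : (k == v) = false := by simpa using hkv
          rw [hbeq] at hci
          simpa using hci.symm
        rw [List.mem_erase_of_ne hkv]
        exact hmiss k hk'
    · simp only [pvGoA, List.foldl_cons]
      rw [if_neg hv]
      have hstep : pvStep b m v = m := by
        unfold pvStep
        by_cases hvb : v ∈ b
        · rw [if_pos hvb]
          have hc : m.contains v = true := by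
            by_contra hc
            exact hv ((hmiss v (Bool.eq_false_iff.mpr hc)).mpr hvb)
          have hsome : (m.get? v).isSome := by
            rw [← PySem.Dict.contains_eq_isSome_get?, hc]
          obtain ⟨w, hw⟩ := Option.isSome_iff_exists.mp hsome
          have hwv : w = v := hm.2 (v, w) (PySem.Dict.mem_items_of_get?_eq_some m hw)
          subst hwv
          exact pvInsert_noop m w hm hw
        · rw [if_neg hvb]
      rw [hstep]
      exact ih fa fb m hm hsub hmiss

-- B's boolean test is membership in the original target list
theorem pvStepB_eq (b : List Int) :
    (fun (ms : PySem.Dict Int Int) (v : Int) =>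
        if PySem.Set.contains (PySem.Set.ofList b) v then ms.insert v v else ms)
      = pvStep b := by
  funext d v
  unfold pvStep
  by_cases hv : v ∈ b
  · simp [PySem.Set.contains, PySem.Set.mem_ofList, hv]
  · simp [PySem.Set.contains, PySem.Set.mem_ofList, hv]

-- ===== VERDICT (by name: the statement is the Claim_ definition above) =====
theorem find_direct_matches_py_spec : Claim_equal_find_direct_matches_py := by
  intro a b _
  unfold Spec_find_direct_matches_py find_direct_matches_py
  show _ = ((PySem.List.dedup a).foldl
      (fun ms v => if PySem.Set.contains (PySem.Set.ofList b) v then ms.insert v v else ms)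
      PySem.Dict.empty).items
  rw [pvStepB_eq b]
  rw [pvGoA_eq_fold b a a b PySem.Dict.empty pvGood_empty (fun _ h => h) (fun _ _ => Iff.rfl)]
  rw [pvFold_dedup b a.length a (le_refl _) PySem.Dict.empty pvGood_empty]
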